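-- pv_equiv track=rewrite | github.com/zongzerookie/ISAAQ---2 | aux_methods.py | get_manual_sequence_ids
-- ===== SOURCE A (Python) =====
-- def get_manual_sequence_ids(input_ids, sep_token_id=2, cls_token_id=0, pad_token_id=1):
--     """
--     手动推导 RoBERTa 的 sequence_ids
--     输入: input_ids (list or tensor)
--     输出: list of [None, 0, 0, ..., None, 1, 1, ..., None]
--     """
--     seq_ids = []
--     sep_count = 0
--
--     # 转换为 list
--     if hasattr(input_ids, 'tolist'):
--         input_ids = input_ids.tolist()
--
--     for token_id in input_ids:
--         # Padding -> None
--         if token_id == pad_token_id: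
--             seq_ids.append(None)
--             continue
--
--         # Special Tokens -> None
--         if token_id in [cls_token_id, sep_token_id]:
--             seq_ids.append(None)
--             if token_id == sep_token_id:
--                 sep_count += 1
--         else:
--             # Content Tokens
--             # 0: Context (遇到第2个SEP之前)
--             # 1: Question/Option (遇到第2个SEP之后)
--             if sep_count < 2:  # RoBERTa 格式: <s> A </s> </s> B </s>
--                 seq_ids.append(0)
--             else:
--                 seq_ids.append(1)
--     return seq_ids
-- ===== SOURCE B (Python) =====
-- def get_manual_sequence_ids(input_ids, sep_token_id=2, cls_token_id=0, pad_token_id=1):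
--     if hasattr(input_ids, 'tolist'):
--         input_ids = input_ids.tolist()
--     # Split point: one past the second separator (whole list if fewer than two).
--     sep_positions = [i for i, t in enumerate(input_ids) if t == sep_token_id]
--     split = sep_positions[1] + 1 if len(sep_positions) >= 2 else len(input_ids)
--     specials = {pad_token_id, cls_token_id, sep_token_id}
--     head = [None if t in specials else 0 for t in input_ids[:split]]
--     tail = [None if t in specials else 1 for t in input_ids[split:]]
--     return head + tail
-- ===== Notes on version B (the rewrite author's own statement) =====
-- stated objective: alternative
-- what changed: Replaces A's single stateful scan with a running sep_count by first collecting separator positions with enumerate, computing the split point one past the second separator, then statelessly labelling the two slices; Pre_ excludes the parameter collision sep_token_id == pad_token_id, a degenerate configuration on which whether such a token counts as a separator is unspecified and A's pad-before-sep check order and B's value-based separator scan are equally defensible.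
-- outside the precondition, e.g. on get_manual_sequence_ids([2, 5, 2, 5], 2, 0, 2): A returns [None, 0, None, 0], B returns [None, 0, None, 1]
import Mathlib
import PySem

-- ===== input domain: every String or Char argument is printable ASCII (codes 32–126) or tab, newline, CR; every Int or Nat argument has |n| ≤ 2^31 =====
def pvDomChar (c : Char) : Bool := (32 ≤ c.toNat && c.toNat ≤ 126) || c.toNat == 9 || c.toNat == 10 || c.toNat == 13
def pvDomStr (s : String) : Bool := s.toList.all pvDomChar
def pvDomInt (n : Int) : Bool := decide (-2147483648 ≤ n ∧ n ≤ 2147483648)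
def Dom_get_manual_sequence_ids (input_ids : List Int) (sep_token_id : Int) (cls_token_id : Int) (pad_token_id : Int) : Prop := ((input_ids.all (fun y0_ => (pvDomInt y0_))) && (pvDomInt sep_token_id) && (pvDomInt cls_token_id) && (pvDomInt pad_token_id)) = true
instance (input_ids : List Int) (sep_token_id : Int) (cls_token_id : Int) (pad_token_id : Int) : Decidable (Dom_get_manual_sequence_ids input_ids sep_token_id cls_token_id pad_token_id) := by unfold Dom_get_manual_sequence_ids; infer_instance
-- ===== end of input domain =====

-- B replaces A's stateful scan (running sep_count) by a precomputed split point one past the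
-- second separator followed by stateless labelling of the two slices (objective: alternative).

-- ===== PORT A =====
def get_manual_sequence_ids (input_ids : List Int) (sep_token_id : Int) (cls_token_id : Int) (pad_token_id : Int) : List (Option Int) :=
  (input_ids.foldl
    (fun (st : List (Option Int) × Int) token_id =>
      if token_id == pad_token_id then (st.1 ++ [none], st.2)
      else if token_id == cls_token_id || token_id == sep_token_id then
        (st.1 ++ [none], if token_id == sep_token_id then st.2 + 1 else st.2)
      else
        (st.1 ++ [if st.2 < 2 then some 0 else some 1], st.2))
    ([], 0)).1

-- ===== PORT B =====
def get_manual_sequence_ids_alt (input_ids : List Int) (sep_token_id : Int) (cls_token_id : Int) (pad_token_id : Int) : List (Option Int) :=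
  let sep_positions :=
    ((PySem.List.enumerate input_ids).filter (fun p => p.2 == sep_token_id)).map Prod.fst
  let split : Int :=
    match sep_positions with
    | _ :: p :: _ => p + 1
    | _ => (input_ids.length : Int)
  let head := (PySem.List.slice input_ids none (some split)).map
    (fun t => if t == pad_token_id || t == cls_token_id || t == sep_token_id then (none : Option Int) else some 0)
  let tail := (PySem.List.slice input_ids (some split) none).map
    (fun t => if t == pad_token_id || t == cls_token_id || t == sep_token_id then (none : Option Int) else some 1)
  head ++ tail

-- ===== PRECONDITION & SPEC =====
-- Pre_ excludes the parameter collision sep_token_id == pad_token_id: a degenerate configuration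
-- on which whether such a token counts as a separator is unspecified (A's pad-before-sep check
-- order and B's value-based separator scan are equally defensible choices there).
def Pre_get_manual_sequence_ids (input_ids : List Int) (sep_token_id : Int) (cls_token_id : Int) (pad_token_id : Int) : Prop :=
  sep_token_id ≠ pad_token_id
instance (input_ids : List Int) (sep_token_id : Int) (cls_token_id : Int) (pad_token_id : Int) : Decidable (Pre_get_manual_sequence_ids input_ids sep_token_id cls_token_id pad_token_id) := by unfold Pre_get_manual_sequence_ids; infer_instance

def pvWitness_get_manual_sequence_ids : List Int × Int × Int × Int := ([0, 5, 2, 6, 2, 7, 1], 2, 0, 1)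

def Spec_get_manual_sequence_ids (input_ids : List Int) (sep_token_id : Int) (cls_token_id : Int) (pad_token_id : Int) (out : List (Option Int)) : Prop := out = get_manual_sequence_ids_alt input_ids sep_token_id cls_token_id pad_token_id
instance (input_ids : List Int) (sep_token_id : Int) (cls_token_id : Int) (pad_token_id : Int) (out : List (Option Int)) : Decidable (Spec_get_manual_sequence_ids input_ids sep_token_id cls_token_id pad_token_id out) := by unfold Spec_get_manual_sequence_ids; infer_instance

-- ===== CLAIM (what is proved, stated in full; the proofs are below) =====
def Claim_equal_get_manual_sequence_ids : Prop := ∀ (input_ids : List Int) (sep_token_id : Int) (cls_token_id : Int) (pad_token_id : Int), Dom_get_manual_sequence_ids input_ids sep_token_id cls_token_id pad_token_id → Pre_get_manual_sequence_ids input_ids sep_token_id cls_token_id pad_token_id → Spec_get_manual_sequence_ids input_ids sep_token_id cls_token_id pad_token_id (get_manual_sequence_ids input_ids sep_token_id cls_token_id pad_token_id)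

-- ===== LEMMAS AND PROOFS =====

-- A's loop as a direct structural recursion on the list, carrying only sep_count.
def goA (sep_token_id cls_token_id pad_token_id : Int) : List Int → Int → List (Option Int)
  | [], _ => []
  | t :: ts, c =>
    if t == pad_token_id then none :: goA sep_token_id cls_token_id pad_token_id ts c
    else if t == cls_token_id || t == sep_token_id then
      none :: goA sep_token_id cls_token_id pad_token_id ts (if t == sep_token_id then c + 1 else c)
    else (if c < 2 then (some 0 : Option Int) else some 1) :: goA sep_token_id cls_token_id pad_token_id ts c

-- Length of the shortest prefix containing `need` separators (whole length if fewer).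
def pvK (sep_token_id : Int) : List Int → Int → Nat
  | [], _ => 0
  | t :: ts, need =>
    if t == sep_token_id && need == 1 then 1
    else 1 + pvK sep_token_id ts (need - (if t == sep_token_id then 1 else 0))

lemma take_drop_cons_shift {α : Type} (x0 x1 : α) (l0 l1 : List α) (m : Nat) :
    List.take (1 + m) (x0 :: l0) ++ List.drop (1 + m) (x1 :: l1)
      = x0 :: (List.take m l0 ++ List.drop m l1) := by
  simp [Nat.add_comm 1 m]

lemma foldA_eq_goA (sep_token_id cls_token_id pad_token_id : Int) :
    ∀ (xs : List Int) (acc : List (Option Int)) (c : Int),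
    (xs.foldl
      (fun (st : List (Option Int) × Int) token_id =>
        if token_id == pad_token_id then (st.1 ++ [none], st.2)
        else if token_id == cls_token_id || token_id == sep_token_id then
          (st.1 ++ [none], if token_id == sep_token_id then st.2 + 1 else st.2)
        else
          (st.1 ++ [if st.2 < 2 then some 0 else some 1], st.2))
      (acc, c)).1 = acc ++ goA sep_token_id cls_token_id pad_token_id xs c := by
  intro xs
  induction xs with
  | nil => intro acc c; simp [goA]
  | cons t ts ih =>
    intro acc c
    simp only [List.foldl_cons]
    by_cases hp : t = pad_token_id
    · rw [if_pos (show (t == pad_token_id) = true by simp [hp]), ih]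
      simp [goA, hp]
    · by_cases hsep : t = sep_token_id
      · rw [hsep] at hp
        rw [if_neg (show ¬ (t == pad_token_id) = true by simp [hsep, hp]),
            if_pos (show (t == cls_token_id || t == sep_token_id) = true by simp [hsep]),
            if_pos (show (t == sep_token_id) = true by simp [hsep]), ih]
        simp [goA, hsep, hp]
      · by_cases hcls : t = cls_token_id
        · rw [hcls] at hp hsep
          rw [if_neg (show ¬ (t == pad_token_id) = true by simp [hcls, hp]),
              if_pos (show (t == cls_token_id || t == sep_token_id) = true by simp [hcls]),
              if_neg (show ¬ (t == sep_token_id) = true by simp [hcls, hsep]), ih]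
          simp [goA, hcls, hp, hsep]
        · rw [if_neg (show ¬ (t == pad_token_id) = true by simp [hp]),
              if_neg (show ¬ (t == cls_token_id || t == sep_token_id) = true by simp [hcls, hsep]), ih]
          simp [goA, hp, hsep, hcls]

lemma goA_ge_two (sep_token_id cls_token_id pad_token_id : Int) :
    ∀ (xs : List Int) (c : Int), 2 ≤ c →
    goA sep_token_id cls_token_id pad_token_id xs c =
      xs.map (fun t => if t == pad_token_id || t == cls_token_id || t == sep_token_id then (none : Option Int) else some 1) := by
  intro xs
  induction xs with
  | nil => intro c _; simp [goA]
  | cons t ts ih =>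
    intro c hc
    by_cases hp : t = pad_token_id
    · simp [goA, hp, ih c hc]
    · by_cases hsep : t = sep_token_id
      · rw [hsep] at hp
        simp [goA, hsep, hp, ih (c + 1) (by omega)]
      · by_cases hcls : t = cls_token_id
        · rw [hcls] at hp hsep
          simp [goA, hcls, hp, hsep, ih c hc]
        · have h2 : ¬ c < 2 := by omega
          simp [goA, hp, hsep, hcls, h2, ih c hc]

lemma goA_lt_two (sep_token_id cls_token_id pad_token_id : Int) (hpd : sep_token_id ≠ pad_token_id) :
    ∀ (xs : List Int) (c : Int), c < 2 →
    goA sep_token_id cls_token_id pad_token_id xs c =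
      (xs.take (pvK sep_token_id xs (2 - c))).map
          (fun t => if t == pad_token_id || t == cls_token_id || t == sep_token_id then (none : Option Int) else some 0)
      ++ (xs.drop (pvK sep_token_id xs (2 - c))).map
          (fun t => if t == pad_token_id || t == cls_token_id || t == sep_token_id then (none : Option Int) else some 1) := by
  intro xs
  induction xs with
  | nil => intro c _; simp [goA, pvK]
  | cons t ts ih =>
    intro c hc
    by_cases hp : t = pad_token_id
    · have hsep : ¬ t = sep_token_id := by rw [hp]; exact fun h => hpd h.symm
      have hK : pvK sep_token_id (t :: ts) (2 - c)
          = 1 + pvK sep_token_id ts (2 - c) := by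
        simp [pvK, hsep]
      rw [hK, List.map_take, List.map_drop, List.map_cons, List.map_cons, take_drop_cons_shift]
      simp [goA, hp, List.map_take, List.map_drop, ih c hc]
    · by_cases hsep : t = sep_token_id
      · rw [hsep] at hp
        by_cases h1 : c = 1
        · have hne : ((2 : Int) - c == 1) = true := by rw [beq_iff_eq]; omega
          have hK : pvK sep_token_id (t :: ts) (2 - c) = 1 := by
            simp [pvK, hsep, hne]
          rw [hK]
          simp [goA, hsep, hp, h1,
                goA_ge_two sep_token_id cls_token_id pad_token_id ts 2 (by omega)]
        · have hne : ((2 : Int) - c == 1) = false := by rw [beq_eq_false_iff_ne]; omega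
          have h2 : 2 - c - 1 = 2 - (c + 1) := by ring
          have hK : pvK sep_token_id (t :: ts) (2 - c)
              = 1 + pvK sep_token_id ts (2 - (c + 1)) := by
            simp [pvK, hsep, hne, h2]
          rw [hK, List.map_take, List.map_drop, List.map_cons, List.map_cons, take_drop_cons_shift]
          simp [goA, hsep, hp, List.map_take, List.map_drop, ih (c + 1) (by omega)]
      · by_cases hcls : t = cls_token_id
        · have hK : pvK sep_token_id (t :: ts) (2 - c)
              = 1 + pvK sep_token_id ts (2 - c) := by
            simp [pvK, hsep]
          have hp' : ¬ cls_token_id = pad_token_id := hcls ▸ hp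
          have hsep' : ¬ cls_token_id = sep_token_id := hcls ▸ hsep
          rw [hK, List.map_take, List.map_drop, List.map_cons, List.map_cons, take_drop_cons_shift]
          simp [goA, hcls, hp', hsep', List.map_take, List.map_drop, ih c hc]
        · have hK : pvK sep_token_id (t :: ts) (2 - c)
              = 1 + pvK sep_token_id ts (2 - c) := by
            simp [pvK, hsep]
          rw [hK, List.map_take, List.map_drop, List.map_cons, List.map_cons, take_drop_cons_shift]
          simp [goA, hp, hsep, hcls, hc, List.map_take, List.map_drop, ih c hc]

-- B's split point (one past the second separator, computed from enumerate positions)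
-- equals pvK at need = 1 / need = 2, for any enumerate offset.
lemma split_eq_pvK_one (sep_token_id : Int) :
    ∀ (xs : List Int) (s : Int),
    (match ((PySem.List.enumerate xs s).filter (fun p => p.2 == sep_token_id)).map Prod.fst with
     | p :: _ => p + 1
     | [] => s + (xs.length : Int)) = s + (pvK sep_token_id xs 1 : Int) := by
  intro xs
  induction xs with
  | nil => intro s; simp [PySem.List.enumerate_nil, pvK]
  | cons t ts ih =>
    intro s
    rw [PySem.List.enumerate_cons]
    by_cases hsep : t = sep_token_id
    · simp [hsep, pvK]
    · have hf : ((t : Int) == sep_token_id) = false := by simp [hsep]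
      simp only [List.filter_cons, hf, Bool.false_eq_true, if_false]
      have := ih (s + 1)
      have hK : pvK sep_token_id (t :: ts) 1 = 1 + pvK sep_token_id ts 1 := by
        simp [pvK, hsep]
      rw [hK]
      cases hm : ((PySem.List.enumerate ts (s + 1)).filter (fun p => p.2 == sep_token_id)).map Prod.fst with
      | nil =>
        rw [hm] at this; simp at this ⊢; omega
      | cons q qs =>
        rw [hm] at this; simp at this ⊢; omega

lemma split_eq_pvK_two (sep_token_id : Int) :
    ∀ (xs : List Int) (s : Int),
    (match ((PySem.List.enumerate xs s).filter (fun p => p.2 == sep_token_id)).map Prod.fst with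
     | _ :: p :: _ => p + 1
     | _ => s + (xs.length : Int)) = s + (pvK sep_token_id xs 2 : Int) := by
  intro xs
  induction xs with
  | nil => intro s; simp [PySem.List.enumerate_nil, pvK]
  | cons t ts ih =>
    intro s
    rw [PySem.List.enumerate_cons]
    by_cases hsep : t = sep_token_id
    · have hK : pvK sep_token_id (t :: ts) 2 = 1 + pvK sep_token_id ts 1 := by
        simp [pvK, hsep]
      rw [hK]
      have := split_eq_pvK_one sep_token_id ts (s + 1)
      simp only [List.filter_cons]
      have htt : ((t : Int) == sep_token_id) = true := by simp [hsep]
      rw [htt]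
      simp only [if_true, List.map_cons]
      cases hm : ((PySem.List.enumerate ts (s + 1)).filter (fun p => p.2 == sep_token_id)).map Prod.fst with
      | nil =>
        rw [hm] at this; simp at this ⊢; omega
      | cons q qs =>
        rw [hm] at this; simp at this ⊢; omega
    · have hf : ((t : Int) == sep_token_id) = false := by simp [hsep]
      simp only [List.filter_cons, hf, Bool.false_eq_true, if_false]
      have := ih (s + 1)
      have hK : pvK sep_token_id (t :: ts) 2 = 1 + pvK sep_token_id ts 2 := by
        simp [pvK, hsep]
      rw [hK]
      cases hm : ((PySem.List.enumerate ts (s + 1)).filter (fun p => p.2 == sep_token_id)).map Prod.fst with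
      | nil =>
        rw [hm] at this; simp at this ⊢; omega
      | cons q qs =>
        cases qs with
        | nil => rw [hm] at this; simp at this ⊢; omega
        | cons r rs => rw [hm] at this; simp at this ⊢; omega

-- B's output in take/drop form with the split point pvK xs 2.
lemma alt_eq_take_drop (input_ids : List Int) (sep_token_id cls_token_id pad_token_id : Int) :
    get_manual_sequence_ids_alt input_ids sep_token_id cls_token_id pad_token_id =
      (input_ids.take (pvK sep_token_id input_ids 2)).map
          (fun t => if t == pad_token_id || t == cls_token_id || t == sep_token_id then (none : Option Int) else some 0)
      ++ (input_ids.drop (pvK sep_token_id input_ids 2)).map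
          (fun t => if t == pad_token_id || t == cls_token_id || t == sep_token_id then (none : Option Int) else some 1) := by
  unfold get_manual_sequence_ids_alt
  have hs := split_eq_pvK_two sep_token_id input_ids 0
  simp only [zero_add] at hs
  have hmatch :
      (match ((PySem.List.enumerate input_ids 0).filter (fun p => p.2 == sep_token_id)).map Prod.fst with
       | _ :: p :: _ => p + 1
       | _ => (input_ids.length : Int)) = ((pvK sep_token_id input_ids 2 : Nat) : Int) := by
    cases hm : ((PySem.List.enumerate input_ids 0).filter (fun p => p.2 == sep_token_id)).map Prod.fst with
    | nil => rw [hm] at hs; simpa using hs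
    | cons q qs =>
      cases qs with
      | nil => rw [hm] at hs; simpa using hs
      | cons r rs => rw [hm] at hs; simpa using hs
  simp only [hmatch, PySem.List.slice_to_natCast, PySem.List.slice_from_natCast]

-- ===== VERDICT (by name: the statement is the Claim_ definition above) =====
theorem get_manual_sequence_ids_spec : Claim_equal_get_manual_sequence_ids := by
  intro input_ids sep_token_id cls_token_id pad_token_id _ hpre
  unfold Spec_get_manual_sequence_ids get_manual_sequence_ids
  rw [alt_eq_take_drop, foldA_eq_goA,
      goA_lt_two sep_token_id cls_token_id pad_token_id hpre input_ids 0 (by omega)]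
  norm_num
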